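-- pv_equiv track=rewrite | github.com/bfairkun/my_utils | src/my_utils/bed_utils.py | blocks_to_bed12
-- ===== SOURCE A (Python) =====
-- def merge_blocks(blocks):
--     """
--     Merge overlapping or adjacent blocks.
--
--     Args:
--         blocks: List of (start, end) tuples
--
--     Returns:
--         List of merged (start, end) tuples
--     """
--     if not blocks:
--         return []
--
--     # Sort by start position
--     blocks = sorted(blocks)
--
--     merged = [blocks[0]]
--     for current_start, current_end in blocks[1:]:
--         last_start, last_end = merged[-1]
--
--         # Merge if overlapping or adjacent
--         if current_start <= last_end:
--             merged[-1] = (last_start, max(last_end, current_end))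
--         else:
--             merged.append((current_start, current_end))
--
--     return merged
--
-- def blocks_to_bed12(chrom, name, strand, blocks, score=".", color="0,0,0"):
--     """
--     Convert a set of blocks to BED12 format.
--
--     Args:
--         chrom: Chromosome name
--         name: Feature name
--         strand: Strand ('+', '-', '.')
--         blocks: List of (start, end) tuples
--         score: Score value
--         color: RGB color string
--
--     Returns:
--         BED12 format string
--     """
--     if not blocks:
--         return ""
--
--     blocks = merge_blocks(blocks)
--
--     # Overall coordinates
--     start = min(b[0] for b in blocks)
--     end = max(b[1] for b in blocks)
--
--     # Thick coordinates
--     thick_start = start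
--     thick_end = end
--
--     block_count = len(blocks)
--
--     # Calculate block sizes and relative starts
--     block_sizes = [str(b[1] - b[0]) for b in blocks]
--     block_starts = [str(b[0] - start) for b in blocks]
--
--     block_sizes_str = ",".join(block_sizes) + ","
--     block_starts_str = ",".join(block_starts) + ","
--
--     return "\t".join(
--         [
--             chrom,
--             str(start),
--             str(end),
--             name,
--             score,
--             strand,
--             str(thick_start),
--             str(thick_end),
--             color,
--             str(block_count),
--             block_sizes_str,
--             block_starts_str,
--         ]
--     )
-- ===== SOURCE B (Python) =====
-- def blocks_to_bed12(chrom, name, strand, blocks, score=".", color="0,0,0"):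
--     """
--     Convert a set of blocks to BED12 format.
--
--     Single fused pass over the sorted blocks: maintains the current merged
--     interval, the running maximum end, the merged-block count and the two
--     comma-separated field strings, without materializing a merged list.
--     """
--     if not blocks:
--         return ""
--
--     bs = sorted(blocks)
--     start = bs[0][0]
--     end = bs[0][1]
--     cur_s, cur_e = bs[0]
--     count = 0
--     sizes = ""
--     starts = ""
--
--     for s, e in bs[1:]:
--         if e > end:
--             end = e
--         if s <= cur_e:
--             if e > cur_e:
--                 cur_e = e
--         else:
--             sizes += str(cur_e - cur_s) + ","
--             starts += str(cur_s - start) + ","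
--             count += 1
--             cur_s, cur_e = s, e
--
--     sizes += str(cur_e - cur_s) + ","
--     starts += str(cur_s - start) + ","
--     count += 1
--
--     return "\t".join(
--         [
--             chrom,
--             str(start),
--             str(end),
--             name,
--             score,
--             strand,
--             str(start),
--             str(end),
--             color,
--             str(count),
--             sizes,
--             starts,
--         ]
--     )
-- ===== Notes on version B (the rewrite author's own statement) =====
-- stated objective: alternative
-- what changed: Replaces A's pipeline (build a merged list, then separate min/max passes and two list comprehensions joined with ','.join) by one fused pass over the sorted blocks that carries the current merged interval, the running maximum end, the block count and the two comma-separated field strings as accumulators, never materializing a merged list.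
import Mathlib
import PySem

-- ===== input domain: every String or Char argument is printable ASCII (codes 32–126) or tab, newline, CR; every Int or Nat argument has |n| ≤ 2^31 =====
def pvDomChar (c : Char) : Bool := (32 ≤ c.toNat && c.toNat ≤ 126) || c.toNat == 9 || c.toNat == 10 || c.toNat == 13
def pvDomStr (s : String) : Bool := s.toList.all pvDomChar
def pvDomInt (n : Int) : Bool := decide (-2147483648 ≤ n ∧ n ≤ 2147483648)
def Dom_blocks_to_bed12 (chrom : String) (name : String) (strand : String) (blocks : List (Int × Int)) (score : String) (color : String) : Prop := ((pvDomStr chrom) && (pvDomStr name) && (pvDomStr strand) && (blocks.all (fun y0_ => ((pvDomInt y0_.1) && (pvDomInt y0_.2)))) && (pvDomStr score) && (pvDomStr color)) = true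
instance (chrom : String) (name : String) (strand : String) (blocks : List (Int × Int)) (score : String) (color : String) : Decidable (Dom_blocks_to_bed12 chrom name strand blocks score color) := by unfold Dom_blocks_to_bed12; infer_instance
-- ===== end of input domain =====

-- B replaces A's merged-list pipeline (merge pass, then min/max passes and two comprehensions with joins)
-- by one fused pass over the sorted blocks carrying interval/end/count/string accumulators (alternative decomposition, same cost).

-- ===== PORT A =====
def merge_blocks (blocks : List (Int × Int)) : List (Int × Int) :=
  if blocks = [] then []
  else
    let bs := PySem.List.sorted2 blocks (fun b => b.1) (fun b => b.2)
    (PySem.List.slice bs (some 1) none).foldl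
      (fun merged cur =>
        let last := PySem.List.pyGetD merged (-1) ((0 : Int), (0 : Int))
        if cur.1 ≤ last.2 then
          merged.dropLast ++ [(last.1, max last.2 cur.2)]
        else merged ++ [cur])
      [PySem.List.pyGetD bs 0 ((0 : Int), (0 : Int))]

def blocks_to_bed12 (chrom : String) (name : String) (strand : String) (blocks : List (Int × Int)) (score : String) (color : String) : String :=
  if blocks = [] then ""
  else
    let m := merge_blocks blocks
    let start := (PySem.List.min? (m.map (fun b => b.1)) (fun x => x)).getD 0
    let stop := (PySem.List.max? (m.map (fun b => b.2)) (fun x => x)).getD 0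
    let thick_start := start
    let thick_end := stop
    let block_count : Int := (m.length : Int)
    let block_sizes := m.map (fun b => PySem.Int.toStr (b.2 - b.1))
    let block_starts := m.map (fun b => PySem.Int.toStr (b.1 - start))
    let sizes_str := PySem.Str.join "," block_sizes ++ ","
    let starts_str := PySem.Str.join "," block_starts ++ ","
    PySem.Str.join "\t" [chrom, PySem.Int.toStr start, PySem.Int.toStr stop, name, score, strand,
      PySem.Int.toStr thick_start, PySem.Int.toStr thick_end, color, PySem.Int.toStr block_count,
      sizes_str, starts_str]

-- ===== PORT B =====
-- the loop body of B; state: (end, cur_s, cur_e, count, sizes, starts)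
def bedAltStep (start : Int) (st : Int × Int × Int × Int × String × String) (se : Int × Int) :
    Int × Int × Int × Int × String × String :=
  let en := if se.2 > st.1 then se.2 else st.1
  if se.1 ≤ st.2.2.1 then
    (en, st.2.1, if se.2 > st.2.2.1 then se.2 else st.2.2.1, st.2.2.2)
  else
    (en, se.1, se.2, st.2.2.2.1 + 1,
     st.2.2.2.2.1 ++ PySem.Int.toStr (st.2.2.1 - st.2.1) ++ ",",
     st.2.2.2.2.2 ++ PySem.Int.toStr (st.2.1 - start) ++ ",")

def blocks_to_bed12_alt (chrom : String) (name : String) (strand : String) (blocks : List (Int × Int)) (score : String) (color : String) : String :=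
  if blocks = [] then ""
  else
    let bs := PySem.List.sorted2 blocks (fun b => b.1) (fun b => b.2)
    let b0 := PySem.List.pyGetD bs 0 ((0 : Int), (0 : Int))
    let start := b0.1
    let st := (PySem.List.slice bs (some 1) none).foldl (bedAltStep start)
      (b0.2, b0.1, b0.2, (0 : Int), "", "")
    let sizes := st.2.2.2.2.1 ++ PySem.Int.toStr (st.2.2.1 - st.2.1) ++ ","
    let starts := st.2.2.2.2.2 ++ PySem.Int.toStr (st.2.1 - start) ++ ","
    let count := st.2.2.2.1 + 1
    PySem.Str.join "\t" [chrom, PySem.Int.toStr start, PySem.Int.toStr st.1, name, score, strand,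
      PySem.Int.toStr start, PySem.Int.toStr st.1, color, PySem.Int.toStr count,
      sizes, starts]

-- ===== PRECONDITION & SPEC =====
def Spec_blocks_to_bed12 (chrom : String) (name : String) (strand : String) (blocks : List (Int × Int)) (score : String) (color : String) (out : String) : Prop := out = blocks_to_bed12_alt chrom name strand blocks score color
instance (chrom : String) (name : String) (strand : String) (blocks : List (Int × Int)) (score : String) (color : String) (out : String) : Decidable (Spec_blocks_to_bed12 chrom name strand blocks score color out) := by unfold Spec_blocks_to_bed12; infer_instance

-- ===== CLAIM (what is proved, stated in full; the proofs are below) =====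
def Claim_equal_blocks_to_bed12 : Prop := ∀ (chrom : String) (name : String) (strand : String) (blocks : List (Int × Int)) (score : String) (color : String), Dom_blocks_to_bed12 chrom name strand blocks score color → Spec_blocks_to_bed12 chrom name strand blocks score color (blocks_to_bed12 chrom name strand blocks score color)

-- ===== LEMMAS AND PROOFS =====

-- specification-level merge state: (already flushed merged intervals, current interval)
def gm : (Int × Int) → List (Int × Int) → List (Int × Int) × (Int × Int)
  | cur, [] => ([], cur)
  | cur, x :: r =>
    if x.1 ≤ cur.2 then gm (cur.1, max cur.2 x.2) r
    else ((gm x r).1.cons cur, (gm x r).2)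

def mList (cur : Int × Int) (rest : List (Int × Int)) : List (Int × Int) :=
  (gm cur rest).1 ++ [(gm cur rest).2]

def catS (f : (Int × Int) → String) (l : List (Int × Int)) : String :=
  l.foldr (fun b acc => f b ++ "," ++ acc) ""

lemma mList_ne_nil (cur : Int × Int) (rest : List (Int × Int)) : mList cur rest ≠ [] := by
  simp [mList]

lemma strJoin_cons_cons (sep x y : String) (t : List String) :
    PySem.Str.join sep (x :: y :: t) = x ++ sep ++ PySem.Str.join sep (y :: t) := by
  apply String.toList_inj.mp
  simp [PySem.Str.join, PySem.Chars.join_cons_cons]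

lemma strJoin_singleton (sep x : String) : PySem.Str.join sep [x] = x := by
  apply String.toList_inj.mp
  simp [PySem.Str.join, PySem.Chars.join_singleton]

lemma joinComma (f : (Int × Int) → String) (l : List (Int × Int)) (last : Int × Int) :
    PySem.Str.join "," ((l ++ [last]).map f) ++ "," = catS f l ++ (f last ++ ",") := by
  induction l with
  | nil => simp [catS, strJoin_singleton]
  | cons a l ih =>
    have hne : (l ++ [last]).map f ≠ [] := by simp
    obtain ⟨y, t, hyt⟩ := List.exists_cons_of_ne_nil hne
    calc PySem.Str.join "," (((a :: l) ++ [last]).map f) ++ ","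
        = (f a ++ "," ++ PySem.Str.join "," ((l ++ [last]).map f)) ++ "," := by
          simp only [List.cons_append, List.map_cons, hyt, strJoin_cons_cons]
      _ = f a ++ "," ++ (PySem.Str.join "," ((l ++ [last]).map f) ++ ",") := by
          simp [String.append_assoc]
      _ = catS f (a :: l) ++ (f last ++ ",") := by
          rw [ih]; simp [catS, String.append_assoc]

lemma ifGtMax (a b : Int) : (if a > b then a else b) = max b a := by
  simp only [max_def]; split_ifs <;> omega

-- A-side: the merge loop computes mList
lemma foldA_gm (rest : List (Int × Int)) : ∀ (acc : List (Int × Int)) (cur : Int × Int),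
    rest.foldl
      (fun merged cur =>
        let last := PySem.List.pyGetD merged (-1) ((0 : Int), (0 : Int))
        if cur.1 ≤ last.2 then
          merged.dropLast ++ [(last.1, max last.2 cur.2)]
        else merged ++ [cur])
      (acc ++ [cur]) = acc ++ mList cur rest := by
  induction rest with
  | nil => intro acc cur; simp [mList, gm]
  | cons x r ih =>
    intro acc cur
    simp only [List.foldl_cons, PySem.List.pyGetD_neg_one_append_singleton, List.dropLast_concat]
    by_cases h : x.1 ≤ cur.2
    · simp only [h, if_pos]
      rw [ih acc (cur.1, max cur.2 x.2)]
      simp [mList, gm, h]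
    · simp only [h, if_neg, not_false_iff]
      have := ih (acc ++ [cur]) x
      simp only [List.append_assoc] at this ⊢
      rw [this]
      simp [mList, gm, h]

-- B-side: the fused loop computes the same data
lemma foldB_gm (start : Int) (rest : List (Int × Int)) :
    ∀ (e0 cnt : Int) (cur : Int × Int) (sz stt : String),
    rest.foldl (bedAltStep start) (e0, cur.1, cur.2, cnt, sz, stt)
    = ((rest.map (fun b => b.2)).foldl max e0,
       (gm cur rest).2.1, (gm cur rest).2.2,
       cnt + ((gm cur rest).1.length : Int),
       sz ++ catS (fun b => PySem.Int.toStr (b.2 - b.1)) (gm cur rest).1,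
       stt ++ catS (fun b => PySem.Int.toStr (b.1 - start)) (gm cur rest).1) := by
  induction rest with
  | nil => intro e0 cnt cur sz stt; simp [gm, catS]
  | cons x r ih =>
    intro e0 cnt cur sz stt
    rw [List.foldl_cons]
    by_cases h : x.1 ≤ cur.2
    · have hstep : bedAltStep start (e0, cur.1, cur.2, cnt, sz, stt) x
        = (max e0 x.2, (cur.1, max cur.2 x.2).1, (cur.1, max cur.2 x.2).2, cnt, sz, stt) := by
        simp [bedAltStep, h, ifGtMax]
      rw [hstep, ih (max e0 x.2) cnt (cur.1, max cur.2 x.2) sz stt]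
      simp [gm, h]
    · have hstep : bedAltStep start (e0, cur.1, cur.2, cnt, sz, stt) x
        = (max e0 x.2, x.1, x.2, cnt + 1, sz ++ PySem.Int.toStr (cur.2 - cur.1) ++ ",",
           stt ++ PySem.Int.toStr (cur.1 - start) ++ ",") := by
        simp [bedAltStep, h, ifGtMax]
      rw [hstep, ih (max e0 x.2) (cnt + 1) x (sz ++ PySem.Int.toStr (cur.2 - cur.1) ++ ",") (stt ++ PySem.Int.toStr (cur.1 - start) ++ ",")]
      simp only [gm, h, if_neg, not_false_iff, List.length_cons, catS, List.foldr_cons, Prod.mk.injEq]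
      refine ⟨rfl, trivial, trivial, by push_cast; ring, ?_, ?_⟩ <;>
        simp [String.append_assoc]

lemma gm_head1 (rest : List (Int × Int)) : ∀ cur : Int × Int, ∃ e t, mList cur rest = (cur.1, e) :: t := by
  induction rest with
  | nil => intro cur; exact ⟨cur.2, [], by simp [mList, gm]⟩
  | cons x r ih =>
    intro cur
    by_cases h : x.1 ≤ cur.2
    · obtain ⟨e, t, ht⟩ := ih (cur.1, max cur.2 x.2)
      exact ⟨e, t, by simpa [mList, gm, h] using ht⟩
    · exact ⟨cur.2, mList x r, by simp [mList, gm, h]⟩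

lemma gm_fst_mem (rest : List (Int × Int)) : ∀ (cur : Int × Int), ∀ y ∈ mList cur rest,
    y.1 = cur.1 ∨ ∃ x ∈ rest, y.1 = x.1 := by
  induction rest with
  | nil => intro cur y hy; left; simp [mList, gm] at hy; simp [hy]
  | cons x r ih =>
    intro cur y hy
    by_cases h : x.1 ≤ cur.2
    · have hy' : y ∈ mList (cur.1, max cur.2 x.2) r := by simpa [mList, gm, h] using hy
      rcases ih _ y hy' with h1 | ⟨z, hz, hz1⟩
      · left; exact h1
      · right; exact ⟨z, List.mem_cons_of_mem _ hz, hz1⟩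
    · have hy' : y = cur ∨ y ∈ mList x r := by
        simpa [mList, gm, h, List.mem_cons] using (by simpa [mList, gm, h] using hy : y ∈ cur :: mList x r)
      rcases hy' with rfl | hy''
      · left; rfl
      · rcases ih x y hy'' with h1 | ⟨z, hz, hz1⟩
        · right; exact ⟨x, List.mem_cons_self, h1⟩
        · right; exact ⟨z, List.mem_cons_of_mem _ hz, hz1⟩

lemma gm_max_ends (rest : List (Int × Int)) : ∀ (cur a : Int × Int) (t : List (Int × Int)),
    mList cur rest = a :: t →
    (t.map (fun b => b.2)).foldl max a.2 = (rest.map (fun b => b.2)).foldl max cur.2 := by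
  induction rest with
  | nil =>
    intro cur a t h
    simp [mList, gm] at h
    simp [← h.1, h.2]
  | cons x r ih =>
    intro cur a t h
    by_cases hc : x.1 ≤ cur.2
    · have h' : mList (cur.1, max cur.2 x.2) r = a :: t := by simpa [mList, gm, hc] using h
      have := ih _ a t h'
      simpa [List.foldl_cons] using this
    · have h' : cur :: mList x r = a :: t := by simpa [mList, gm, hc] using h
      obtain ⟨b, t', hbt⟩ : ∃ b t', mList x r = b :: t' :=
        List.exists_cons_of_ne_nil (mList_ne_nil x r)
      obtain ⟨ha, ht⟩ := List.cons_eq_cons.mp h'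
      subst ha
      rw [hbt] at ht
      subst ht
      have hIH := ih x b t' hbt
      calc ((b :: t').map (fun b => b.2)).foldl max cur.2
          = (t'.map (fun b => b.2)).foldl max (max cur.2 b.2) := by simp [List.foldl_cons]
        _ = max cur.2 ((t'.map (fun b => b.2)).foldl max b.2) := List.foldl_assoc
        _ = max cur.2 ((r.map (fun b => b.2)).foldl max x.2) := by rw [hIH]
        _ = ((r.map (fun b => b.2)).foldl max (max cur.2 x.2)) := List.foldl_assoc.symm
        _ = (((x :: r)).map (fun b => b.2)).foldl max cur.2 := by simp [List.foldl_cons]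

lemma insertLex_pairwise_fst (x : Int × Int) (ys : List (Int × Int))
    (h : ys.Pairwise (fun a b => a.1 ≤ b.1)) :
    (PySem.List.insertBy (fun a b => decide (a.1 < b.1) || (!decide (b.1 < a.1) && decide (a.2 < b.2))) x ys).Pairwise
      (fun a b => a.1 ≤ b.1) := by
  induction ys with
  | nil => simp [PySem.List.insertBy]
  | cons y ys ih =>
    rw [List.pairwise_cons] at h
    show (if (decide (x.1 < y.1) || (!decide (y.1 < x.1) && decide (x.2 < y.2))) then _ else y :: PySem.List.insertBy _ x ys).Pairwise _
    split_ifs with hb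
    · have hxy : x.1 ≤ y.1 := by
        rcases Bool.or_eq_true_iff.mp hb with h1 | h2
        · simp at h1; omega
        · simp at h2; omega
      refine List.pairwise_cons.mpr ⟨?_, List.pairwise_cons.mpr h⟩
      intro a ha
      rcases List.mem_cons.mp ha with rfl | ha'
      · exact hxy
      · exact le_trans hxy (h.1 a ha')
    · have hyx : y.1 ≤ x.1 := by
        simp only [Bool.or_eq_true_iff, not_or, Bool.and_eq_true_iff, decide_eq_true_eq] at hb
        omega
      refine List.pairwise_cons.mpr ⟨?_, ih h.2⟩
      intro a ha
      rcases (PySem.List.insertBy_mem_iff _ x a ys).mp ha with rfl | ha'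
      · exact hyx
      · exact h.1 a ha'

lemma sorted2_pairwise_fst (xs : List (Int × Int)) :
    (PySem.List.sorted2 xs (fun b => b.1) (fun b => b.2) false).Pairwise (fun a b => a.1 ≤ b.1) := by
  show (xs.foldl (fun acc x => PySem.List.insertBy _ x acc) []).Pairwise _
  have : ∀ (l : List (Int × Int)) (acc : List (Int × Int)), acc.Pairwise (fun a b => a.1 ≤ b.1) →
      (l.foldl (fun acc x => PySem.List.insertBy (fun a b => decide (a.1 < b.1) || (!decide (b.1 < a.1) && decide (a.2 < b.2))) x acc) acc).Pairwise (fun a b => a.1 ≤ b.1) := by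
    intro l
    induction l with
    | nil => intro acc h; exact h
    | cons x l ih => intro acc h; exact ih _ (insertLex_pairwise_fst x acc h)
  exact this xs [] (by simp)

-- min extraction
lemma min_start (m : List (Int × Int)) (c e : Int) (t : List (Int × Int)) (hm : m = (c, e) :: t)
    (hlb : ∀ y ∈ m, c ≤ y.1) :
    (PySem.List.min? (m.map (fun b => b.1)) (fun x => x)).getD 0 = c := by
  subst hm
  rw [List.map_cons, PySem.List.min?_id_cons, Option.getD_some]
  refine le_antisymm ((PySem.List.foldl_min_le _ _).1) ?_
  rcases PySem.List.foldl_min_mem (t.map (fun b => b.1)) (c, e).1 with h | h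
  · exact le_of_eq h.symm
  · obtain ⟨y, hy, hy1⟩ := List.mem_map.mp h
    rw [← hy1]; exact hlb y (List.mem_cons_of_mem _ hy)

lemma max_end (m : List (Int × Int)) (a : Int × Int) (t : List (Int × Int)) (hm : m = a :: t) :
    (PySem.List.max? (m.map (fun b => b.2)) (fun x => x)).getD 0 = (t.map (fun b => b.2)).foldl max a.2 := by
  subst hm
  rw [List.map_cons, PySem.List.max?_id_cons, Option.getD_some]

-- ===== VERDICT (by name: the statement is the Claim_ definition above) =====
theorem blocks_to_bed12_spec : Claim_equal_blocks_to_bed12 := by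
  intro chrom name strand blocks score color _hDom
  unfold Spec_blocks_to_bed12

  by_cases hb : blocks = []
  · simp [blocks_to_bed12, blocks_to_bed12_alt, hb]
  · have hne : PySem.List.sorted2 blocks (fun b => b.1) (fun b => b.2) false ≠ [] := by
      intro h
      have := (PySem.List.sorted2_perm blocks (fun b => b.1) (fun b => b.2) false).length_eq
      rw [h] at this
      exact hb (List.eq_nil_of_length_eq_zero this.symm)
    obtain ⟨b0, rest, hbs⟩ := List.exists_cons_of_ne_nil hne
    have hslice : PySem.List.slice (PySem.List.sorted2 blocks (fun b => b.1) (fun b => b.2) false) (some 1) none = rest := by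
      rw [PySem.List.slice_from _ (by norm_num : (0:Int) ≤ 1), hbs]
      rfl
    have hm : merge_blocks blocks = mList b0 rest := by
      rw [merge_blocks, if_neg hb]
      simp only []
      rw [hslice, hbs, PySem.List.pyGetD_zero_cons]
      have := foldA_gm rest [] b0
      rw [List.nil_append] at this
      rw [this, List.nil_append]
    -- facts about mList b0 rest
    obtain ⟨e1, t1, hhead⟩ := gm_head1 rest b0
    have hpw : ∀ x ∈ rest, b0.1 ≤ x.1 := by
      have := sorted2_pairwise_fst blocks
      rw [hbs, List.pairwise_cons] at this
      exact this.1
    have hlb : ∀ y ∈ mList b0 rest, b0.1 ≤ y.1 := by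
      intro y hy
      rcases gm_fst_mem rest b0 y hy with h1 | ⟨x, hx, hx1⟩
      · omega
      · rw [hx1]; exact hpw x hx
    have hstart : (PySem.List.min? ((mList b0 rest).map (fun b => b.1)) (fun x => x)).getD 0 = b0.1 :=
      min_start _ _ _ _ hhead hlb
    have hend : (PySem.List.max? ((mList b0 rest).map (fun b => b.2)) (fun x => x)).getD 0
        = (rest.map (fun b => b.2)).foldl max b0.2 := by
      rw [max_end _ _ _ hhead]
      exact gm_max_ends rest b0 _ _ hhead
    -- unfold the two sides
    rw [blocks_to_bed12, blocks_to_bed12_alt, if_neg hb, if_neg hb]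
    simp only []
    rw [hslice, hbs, PySem.List.pyGetD_zero_cons, hm, hstart, hend]
    rw [foldB_gm b0.1 rest b0.2 0 b0 "" ""]
    simp only [mList]
    congr 1
    simp only [List.cons.injEq, true_and, and_true]
    refine ⟨?_, ?_, ?_⟩
    · congr 1
      simp only [List.length_append, List.length_cons, List.length_nil]
      push_cast
      ring
    · rw [joinComma]
      simp [String.append_assoc]
    · rw [joinComma]
      simp [String.append_assoc]
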